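-- pv_equiv track=rewrite | github.com/hwarang97/jungle-algorithm | week4/problem-solving/난이도하_그래프DFSBFS_점프왕쩰리_실버4.py | is_attachable
-- ===== SOURCE A (Python) =====
-- def is_attachable(x, y, n, matrix):
--     if x >= n or y >= n or matrix[x][y] == 0:
--         return False
--
--     if matrix[x][y] == -1:
--         return True
--
--     move_delta = matrix[x][y]
--     is_left_attachable = is_attachable(x, y + move_delta, n, matrix)
--     is_right_attachable = is_attachable(x + move_delta, y, n, matrix)
--     return is_left_attachable or is_right_attachable
-- ===== SOURCE B (Python) =====
-- def is_attachable(x, y, n, matrix):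
--     # Bottom-up DP: jumps only increase coordinates, so compute reachability
--     # for every cell once, scanning rows and columns from high to low.
--     if not (0 <= x < n and 0 <= y < n):
--         return False
--     rows = []  # rows[0] is the reachability row for line i+1, etc.
--     for i in reversed(range(n)):
--         row = []  # row[0] is the reachability cell for column j+1, etc.
--         for j in reversed(range(n)):
--             v = matrix[i][j]
--             if v == -1:
--                 cell = True
--             elif v < 1:
--                 cell = False
--             else:
--                 right = row[v - 1] if v - 1 < len(row) else False
--                 down = rows[v - 1][j] if v - 1 < len(rows) else False
--                 cell = right or down
--             row.insert(0, cell)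
--         rows.insert(0, row)
--     return rows[x][y]
-- ===== Notes on version B (the rewrite author's own statement) =====
-- stated objective: alternative
-- what changed: A's recursive DFS may re-explore the same cell many times (exponentially often in the worst case); B computes reachability bottom-up in a dynamic-programming table, evaluating each of the n^2 cells exactly once and then looking the answer up.
-- intended difference: On in-board coordinates (x < n, y < n) with x < 0 or y < 0 whose wrap-around cell matrix[x][y] holds -1, A returns True through Python's negative indexing while B returns False, the intended value, since an off-board starting cell cannot reach the goal. — e.g. on is_attachable(-1, 0, 2, [[0, 0], [-1, 0]]): A returns true, B returns false
-- outside the precondition, e.g. on is_attachable(0, 0, 3, [[-1]]): A returns True, B raises IndexError; on is_attachable(0, 0, 2, [[-1, -2], [0, 0]]): A returns True, B returns True; on is_attachable(-1, 0, 2, [[0, 0], [1, -1]]): A returns True, B returns False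
import Mathlib
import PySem

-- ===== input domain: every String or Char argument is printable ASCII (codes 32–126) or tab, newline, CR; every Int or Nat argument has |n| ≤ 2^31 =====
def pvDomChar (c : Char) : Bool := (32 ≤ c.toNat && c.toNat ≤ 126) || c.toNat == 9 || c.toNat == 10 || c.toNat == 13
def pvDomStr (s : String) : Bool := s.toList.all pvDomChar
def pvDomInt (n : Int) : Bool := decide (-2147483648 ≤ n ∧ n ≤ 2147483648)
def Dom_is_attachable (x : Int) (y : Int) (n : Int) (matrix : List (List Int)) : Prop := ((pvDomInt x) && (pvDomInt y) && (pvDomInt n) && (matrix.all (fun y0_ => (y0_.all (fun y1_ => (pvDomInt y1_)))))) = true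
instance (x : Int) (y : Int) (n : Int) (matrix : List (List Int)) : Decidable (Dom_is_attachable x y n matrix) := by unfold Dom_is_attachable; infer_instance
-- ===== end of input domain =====

-- B replaces A's recursive DFS (which may re-explore the same cell many times) by a
-- bottom-up dynamic-programming table that evaluates each cell exactly once (objective:
-- alternative algorithm); on in-board coordinates with a negative component whose
-- wrap-around cell is the goal, A returns True through Python's negative indexing and
-- B intentionally returns False (D_).


-- ===== PORT A =====
-- Fuelled transliteration of A's recursion: under Pre_ every recursive call strictly
-- decreases (n - x).toNat + (n - y).toNat and stops once x ≥ n or y ≥ n, so the fuel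
-- supplied below is never exhausted on inputs of Pre_. matrix[x][y] is ported with
-- PySem.List.pyGet? (Python's negative-index wrap-around included); the .getD defaults
-- are unreachable under Pre_ (there the lookup is always in range).
def isAttachableFuel (fuel : Nat) (x : Int) (y : Int) (n : Int) (matrix : List (List Int)) : Bool :=
  match fuel with
  | 0 => false
  | fuel + 1 =>
    if x ≥ n ∨ y ≥ n then false                                 -- if x >= n or y >= n or matrix[x][y] == 0: return False
    else
      let v := (PySem.List.pyGet? ((PySem.List.pyGet? matrix x).getD []) y).getD 0
      if v = 0 then false
      else if v = -1 then true                                  -- if matrix[x][y] == -1: return True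
      else
        let is_left_attachable := isAttachableFuel fuel x (y + v) n matrix
        let is_right_attachable := isAttachableFuel fuel (x + v) y n matrix
        is_left_attachable || is_right_attachable

def is_attachable (x : Int) (y : Int) (n : Int) (matrix : List (List Int)) : Bool :=
  isAttachableFuel ((n - x).toNat + (n - y).toNat + 1) x y n matrix

-- ===== PORT B =====
-- one inner-loop step of Source B: compute the cell for column j and prepend it to `row`
def altCellStep (matrix : List (List Int)) (i : Int) (rows : List (List Bool)) (row : List Bool) (j : Int) : List Bool :=
  let v := (PySem.List.pyGet? ((PySem.List.pyGet? matrix i).getD []) j).getD 0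
  let cell :=
    if v = -1 then true
    else if v < 1 then false
    else
      let right := if v - 1 < (row.length : Int) then row.getD (v - 1).toNat false else false
      let down := if v - 1 < (rows.length : Int) then (rows.getD (v - 1).toNat []).getD j.toNat false else false
      right || down
  cell :: row

-- one outer-loop step of Source B: build the row for line i and prepend it to `rows`
def altRowStep (matrix : List (List Int)) (n : Int) (rows : List (List Bool)) (i : Int) : List (List Bool) :=
  ((PySem.List.pyRange 0 n 1).reverse.foldl (altCellStep matrix i rows) []) :: rows

def is_attachable_alt (x : Int) (y : Int) (n : Int) (matrix : List (List Int)) : Bool :=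
  if 0 ≤ x ∧ x < n ∧ 0 ≤ y ∧ y < n then
    let rows := (PySem.List.pyRange 0 n 1).reverse.foldl (altRowStep matrix n) []
    (rows.getD x.toNat []).getD y.toNat false
  else false

-- ===== PRECONDITION & SPEC =====
-- the board cell at (x, y) with Python's wrap-around convention, stated purely as an
-- index property of the input (a negative coordinate counts from the end)
def wrapCell (x : Int) (y : Int) (m : List (List Int)) : Int :=
  let r := m.getD (x % (m.length : Int)).toNat []
  r.getD (y % (r.length : Int)).toNat 0

-- For an in-board start (x < n and y < n) Pre_ requires a board of at least n rows of at
-- least n cells (a shorter board can make A raise IndexError), entries -1 or nonnegative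
-- (an entry ≤ -2 makes A jump backwards: IndexError or unbounded recursion), coordinates
-- no further below 0 than Python's wrap-around reaches (below that A raises IndexError),
-- and, for a start with a negative coordinate, a wrap-around cell holding -1 or 0:
-- a positive jump there makes A walk the board from a wrapped position, a value that is
-- an accident of Python's negative indexing which B (off-board = unreachable) cannot
-- match and that no single input condition captures; the immediate wrap-around cases
-- stay inside Pre_ and the disagreeing ones are declared as D_ below.
def Pre_is_attachable (x : Int) (y : Int) (n : Int) (matrix : List (List Int)) : Prop :=
  n ≤ x ∨ n ≤ y ∨
    (n ≤ (matrix.length : Int) ∧ (∀ row ∈ matrix, n ≤ (row.length : Int)) ∧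
     (∀ row ∈ matrix, ∀ v ∈ row, v = -1 ∨ 0 ≤ v) ∧
     -(matrix.length : Int) ≤ x ∧ (∀ row ∈ matrix, -(row.length : Int) ≤ y) ∧
     ((0 ≤ x ∧ 0 ≤ y) ∨ wrapCell x y matrix = -1 ∨ wrapCell x y matrix = 0))

instance (x : Int) (y : Int) (n : Int) (matrix : List (List Int)) : Decidable (Pre_is_attachable x y n matrix) := by unfold Pre_is_attachable; infer_instance

def pvWitness_is_attachable : Int × Int × Int × List (List Int) := (0, 0, 2, [[1, 1], [1, -1]])

-- On in-board coordinates (x < n, y < n) with x < 0 or y < 0 whose wrap-around cell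
-- holds -1, A returns True through Python's negative indexing; B returns False, the
-- intended value, since an off-board starting cell cannot reach the goal.
def D_is_attachable (x : Int) (y : Int) (n : Int) (matrix : List (List Int)) : Prop :=
  (x < 0 ∨ y < 0) ∧ x < n ∧ y < n ∧ wrapCell x y matrix = -1
instance (x : Int) (y : Int) (n : Int) (matrix : List (List Int)) : Decidable (D_is_attachable x y n matrix) := by unfold D_is_attachable; infer_instance

def Spec_is_attachable (x : Int) (y : Int) (n : Int) (matrix : List (List Int)) (out : Bool) : Prop := ¬ D_is_attachable x y n matrix → out = is_attachable_alt x y n matrix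
instance (x : Int) (y : Int) (n : Int) (matrix : List (List Int)) (out : Bool) : Decidable (Spec_is_attachable x y n matrix out) := by unfold Spec_is_attachable; infer_instance

def pvDiffWitness_is_attachable : Int × Int × Int × List (List Int) := (-1, 0, 2, [[0, 0], [-1, 0]])
def pvDiffWitnessOut_is_attachable : Bool × Bool := (true, false)

-- ===== CLAIM (what is proved, stated in full; the proofs are below) =====
def Claim_unchanged_is_attachable : Prop := ∀ (x : Int) (y : Int) (n : Int) (matrix : List (List Int)), Dom_is_attachable x y n matrix → Pre_is_attachable x y n matrix → Spec_is_attachable x y n matrix (is_attachable x y n matrix)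
def Claim_changed_is_attachable : Prop := Dom_is_attachable (pvDiffWitness_is_attachable.1) (pvDiffWitness_is_attachable.2.1) (pvDiffWitness_is_attachable.2.2.1) (pvDiffWitness_is_attachable.2.2.2) ∧ Pre_is_attachable (pvDiffWitness_is_attachable.1) (pvDiffWitness_is_attachable.2.1) (pvDiffWitness_is_attachable.2.2.1) (pvDiffWitness_is_attachable.2.2.2) ∧ D_is_attachable (pvDiffWitness_is_attachable.1) (pvDiffWitness_is_attachable.2.1) (pvDiffWitness_is_attachable.2.2.1) (pvDiffWitness_is_attachable.2.2.2) ∧ is_attachable (pvDiffWitness_is_attachable.1) (pvDiffWitness_is_attachable.2.1) (pvDiffWitness_is_attachable.2.2.1) (pvDiffWitness_is_attachable.2.2.2) = pvDiffWitnessOut_is_attachable.1 ∧ is_attachable_alt (pvDiffWitness_is_attachable.1) (pvDiffWitness_is_attachable.2.1) (pvDiffWitness_is_attachable.2.2.1) (pvDiffWitness_is_attachable.2.2.2) = pvDiffWitnessOut_is_attachable.2 ∧ pvDiffWitnessOut_is_attachable.1 ≠ pvDiffWitnessOut_is_attachable.2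
def Claim_exact_is_attachable : Prop := ∀ (x : Int) (y : Int) (n : Int) (matrix : List (List Int)), Dom_is_attachable x y n matrix → Pre_is_attachable x y n matrix → D_is_attachable x y n matrix → is_attachable x y n matrix ≠ is_attachable_alt x y n matrix

-- ===== LEMMAS AND PROOFS =====

-- one wrap-around lookup equals Python-style indexing, when the index is in wrap range
lemma pyGet_wrap {α : Type} (xs : List α) (i : Int) (d : α)
    (h1 : -(xs.length : Int) ≤ i) (h2 : i < (xs.length : Int)) :
    (PySem.List.pyGet? xs i).getD d = xs.getD (i % (xs.length : Int)).toNat d := by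
  by_cases h : i < 0
  · have hmod : i % (xs.length : Int) = i + xs.length := by
      have hself := Int.add_mul_emod_self_left (a := i) (b := (xs.length : Int)) (c := 1)
      rw [mul_one] at hself
      rw [← hself, Int.emod_eq_of_lt (by omega) (by omega)]
    have hk : i = -(((-i).toNat : Nat) : Int) := by omega
    rw [hmod, hk, PySem.List.pyGet?_neg_natCast _ _ (by omega) (by omega),
      List.getD_eq_getElem?_getD]
    congr 2
    omega
  · rw [Int.emod_eq_of_lt (by omega) h2, PySem.List.pyGet?_of_nonneg _ (by omega),
      List.getD_eq_getElem?_getD]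

-- the ports' double lookup of matrix[x][y] equals wrapCell, under Pre_'s wrap bounds
lemma lookup_eq_wrapCell (matrix : List (List Int)) (x y : Int)
    (hxlo : -(matrix.length : Int) ≤ x) (hxhi : x < (matrix.length : Int))
    (hylo : ∀ row ∈ matrix, -(row.length : Int) ≤ y)
    (hyhi : ∀ row ∈ matrix, y < (row.length : Int)) :
    (PySem.List.pyGet? ((PySem.List.pyGet? matrix x).getD []) y).getD 0 = wrapCell x y matrix := by
  rw [pyGet_wrap matrix x [] hxlo hxhi]
  have hemod : 0 ≤ x % (matrix.length : Int) ∧ x % (matrix.length : Int) < matrix.length :=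
    ⟨Int.emod_nonneg x (by omega), Int.emod_lt_of_pos x (by omega)⟩
  have hidx : (x % (matrix.length : Int)).toNat < matrix.length := by omega
  have hmem : matrix.getD (x % (matrix.length : Int)).toNat [] ∈ matrix := by
    rw [List.getD_eq_getElem?_getD, List.getElem?_eq_getElem hidx]
    exact List.getElem_mem hidx
  rw [pyGet_wrap _ y 0 (hylo _ hmem) (hyhi _ hmem)]
  rfl

-- A returns immediately when the first cell it reads holds 0 or -1
lemma isAttachableFuel_start (fuel : Nat) (x y n : Int) (matrix : List (List Int)) (c : Int)
    (h : ¬ (x ≥ n ∨ y ≥ n))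
    (hc : (PySem.List.pyGet? ((PySem.List.pyGet? matrix x).getD []) y).getD 0 = c) :
    isAttachableFuel (fuel + 1) x y n matrix
      = if c = 0 then false else if c = -1 then true
        else isAttachableFuel fuel x (y + c) n matrix || isAttachableFuel fuel (x + c) y n matrix := by
  simp only [isAttachableFuel, hc, if_neg h]

lemma alt_false_of_neg (x y n : Int) (matrix : List (List Int)) (h : x < 0 ∨ y < 0) :
    is_attachable_alt x y n matrix = false := by
  unfold is_attachable_alt
  rw [if_neg (by rintro ⟨h1, _, h3, _⟩; rcases h with h | h <;> omega)]

-- the value of cell (i, j); equals matrix[i][j] whenever i, j are in range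
def valAt (matrix : List (List Int)) (i j : Nat) : Int := (matrix.getD i []).getD j 0

-- reference reachability table: tab matrix N i j says whether (i, j) reaches a -1 cell,
-- by well-founded recursion on the distance of (i, j) from the bottom-right corner
def tab (matrix : List (List Int)) (N : Nat) (i j : Nat) : Bool :=
  if _h : i < N ∧ j < N then
    if _hv1 : valAt matrix i j = -1 then true
    else if _hv2 : valAt matrix i j < 1 then false
    else
      (if _hj : j + (valAt matrix i j).toNat < N then tab matrix N i (j + (valAt matrix i j).toNat) else false) ||
      (if _hi : i + (valAt matrix i j).toNat < N then tab matrix N (i + (valAt matrix i j).toNat) j else false)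
  else false
termination_by (N - i) + (N - j)
decreasing_by
  · omega
  · omega

lemma tab_eq (matrix : List (List Int)) (N : Nat) (i j : Nat) (hi : i < N) (hj : j < N) :
    tab matrix N i j =
      (if valAt matrix i j = -1 then true
       else if valAt matrix i j < 1 then false
       else
         (if j + (valAt matrix i j).toNat < N then tab matrix N i (j + (valAt matrix i j).toNat) else false) ||
         (if i + (valAt matrix i j).toNat < N then tab matrix N (i + (valAt matrix i j).toNat) j else false)) := by
  rw [tab]
  simp [hi, hj]

-- the suffix of B's row for line i holding the cells for columns j..N-1
def cellsFrom (matrix : List (List Int)) (N i j : Nat) : List Bool :=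
  (List.range (N - j)).map (fun t => tab matrix N i (j + t))

-- the suffix of B's table holding the rows for lines i..N-1
def rowsFrom (matrix : List (List Int)) (N i : Nat) : List (List Bool) :=
  (List.range (N - i)).map (fun t => cellsFrom matrix N (i + t) 0)

lemma cellsFrom_cons (matrix : List (List Int)) (N i j : Nat) (hj : j < N) :
    cellsFrom matrix N i j = tab matrix N i j :: cellsFrom matrix N i (j + 1) := by
  unfold cellsFrom
  have h : N - j = (N - (j + 1)) + 1 := by omega
  rw [h, List.range_succ_eq_map, List.map_cons, List.map_map, Nat.add_zero]
  congr 1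
  refine List.map_congr_left (fun t _ => ?_)
  simp only [Function.comp_apply]
  congr 1
  omega

lemma rowsFrom_cons (matrix : List (List Int)) (N i : Nat) (hi : i < N) :
    rowsFrom matrix N i = cellsFrom matrix N i 0 :: rowsFrom matrix N (i + 1) := by
  unfold rowsFrom
  have h : N - i = (N - (i + 1)) + 1 := by omega
  rw [h, List.range_succ_eq_map, List.map_cons, List.map_map, Nat.add_zero]
  congr 1
  refine List.map_congr_left (fun t _ => ?_)
  simp only [Function.comp_apply]
  rw [show i + (t + 1) = i + 1 + t by omega]

lemma length_cellsFrom (matrix : List (List Int)) (N i j : Nat) :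
    (cellsFrom matrix N i j).length = N - j := by
  simp [cellsFrom]

lemma length_rowsFrom (matrix : List (List Int)) (N i : Nat) :
    (rowsFrom matrix N i).length = N - i := by
  simp [rowsFrom]

lemma getD_cellsFrom (matrix : List (List Int)) (N i j t : Nat) (h : t < N - j) :
    (cellsFrom matrix N i j).getD t false = tab matrix N i (j + t) := by
  unfold cellsFrom
  rw [PySem.List.getD_map_range _ _ _ _ h]

lemma getD_rowsFrom (matrix : List (List Int)) (N i t : Nat) (h : t < N - i) :
    (rowsFrom matrix N i).getD t [] = cellsFrom matrix N (i + t) 0 := by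
  unfold rowsFrom
  rw [PySem.List.getD_map_range _ _ _ _ h]

-- the ports' lookup of matrix[i][j] is valAt, for nonnegative coordinates
lemma lookup_eq_valAt (matrix : List (List Int)) (x y : Int) (hx : 0 ≤ x) (hy : 0 ≤ y) :
    (PySem.List.pyGet? ((PySem.List.pyGet? matrix x).getD []) y).getD 0 = valAt matrix x.toNat y.toNat := by
  rw [PySem.List.pyGet?_of_nonneg _ hx, PySem.List.pyGet?_of_nonneg _ hy]
  simp [valAt, List.getD_eq_getElem?_getD]

-- one inner step of B computes exactly one more tab cell
lemma altCellStep_eq (matrix : List (List Int)) (N i j : Nat) (hi : i < N) (hj : j < N) :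
    altCellStep matrix (i : Int) (rowsFrom matrix N (i + 1)) (cellsFrom matrix N i (j + 1)) (j : Int)
      = cellsFrom matrix N i j := by
  rw [cellsFrom_cons matrix N i j hj]
  unfold altCellStep
  rw [show (PySem.List.pyGet? ((PySem.List.pyGet? matrix (i : Int)).getD []) (j : Int)).getD 0
        = valAt matrix i j by
    rw [lookup_eq_valAt matrix _ _ (by omega) (by omega)]; simp]
  rw [tab_eq matrix N i j hi hj]
  by_cases h1 : valAt matrix i j = -1
  · simp [h1]
  · by_cases h2 : valAt matrix i j < 1
    · simp [h1, h2]
    · simp only [if_neg h1, if_neg h2]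
      have hv1 : 1 ≤ valAt matrix i j := by omega
      have hright :
          (if valAt matrix i j - 1 < ((cellsFrom matrix N i (j + 1)).length : Int)
            then (cellsFrom matrix N i (j + 1)).getD (valAt matrix i j - 1).toNat false else false)
            = (if j + (valAt matrix i j).toNat < N
                then tab matrix N i (j + (valAt matrix i j).toNat) else false) := by
        rw [length_cellsFrom]
        by_cases hr : j + (valAt matrix i j).toNat < N
        · rw [if_pos (show valAt matrix i j - 1 < ((N - (j + 1) : Nat) : Int) by omega),
            if_pos hr,
            getD_cellsFrom matrix N i (j + 1) (valAt matrix i j - 1).toNat (by omega),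
            show j + 1 + (valAt matrix i j - 1).toNat = j + (valAt matrix i j).toNat by omega]
        · rw [if_neg (show ¬ valAt matrix i j - 1 < ((N - (j + 1) : Nat) : Int) by omega),
            if_neg hr]
      have hdown :
          (if valAt matrix i j - 1 < ((rowsFrom matrix N (i + 1)).length : Int)
            then ((rowsFrom matrix N (i + 1)).getD (valAt matrix i j - 1).toNat []).getD
              ((j : Int)).toNat false else false)
            = (if i + (valAt matrix i j).toNat < N
                then tab matrix N (i + (valAt matrix i j).toNat) j else false) := by
        rw [length_rowsFrom]
        by_cases hd : i + (valAt matrix i j).toNat < N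
        · rw [if_pos (show valAt matrix i j - 1 < ((N - (i + 1) : Nat) : Int) by omega),
            if_pos hd,
            getD_rowsFrom matrix N (i + 1) (valAt matrix i j - 1).toNat (by omega),
            show i + 1 + (valAt matrix i j - 1).toNat = i + (valAt matrix i j).toNat by omega,
            Int.toNat_natCast,
            getD_cellsFrom matrix N (i + (valAt matrix i j).toNat) 0 j (by omega),
            Nat.zero_add]
        · rw [if_neg (show ¬ valAt matrix i j - 1 < ((N - (i + 1) : Nat) : Int) by omega),
            if_neg hd]
      rw [hright, hdown]

-- B's inner loop, started at column j with the suffix already built, finishes the row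
lemma inner_loop (matrix : List (List Int)) (N i : Nat) (hi : i < N) :
    ∀ j : Nat, j ≤ N →
      (PySem.List.pyRange 0 (j : Int) 1).reverse.foldl
          (altCellStep matrix (i : Int) (rowsFrom matrix N (i + 1))) (cellsFrom matrix N i j)
        = cellsFrom matrix N i 0 := by
  intro j
  induction j with
  | zero => intro _; simp
  | succ j ih =>
    intro hle
    rw [show ((j + 1 : Nat) : Int) = (j : Int) + 1 by push_cast; ring,
      PySem.List.pyRange_one_succ_right (by positivity), List.reverse_append]
    simp only [List.reverse_cons, List.reverse_nil, List.nil_append, List.singleton_append,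
      List.foldl_cons]
    rw [altCellStep_eq matrix N i j hi (by omega)]
    exact ih (by omega)

-- B's outer loop, started at line i with the suffix of rows already built, finishes the table
lemma outer_loop (matrix : List (List Int)) (N : Nat) :
    ∀ i : Nat, i ≤ N →
      (PySem.List.pyRange 0 (i : Int) 1).reverse.foldl
          (altRowStep matrix (N : Int)) (rowsFrom matrix N i)
        = rowsFrom matrix N 0 := by
  intro i
  induction i with
  | zero => intro _; simp
  | succ i ih =>
    intro hle
    rw [show ((i + 1 : Nat) : Int) = (i : Int) + 1 by push_cast; ring,
      PySem.List.pyRange_one_succ_right (by positivity), List.reverse_append]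
    simp only [List.reverse_cons, List.reverse_nil, List.nil_append, List.singleton_append,
      List.foldl_cons]
    have hstep : altRowStep matrix (N : Int) (rowsFrom matrix N (i + 1)) (i : Int)
        = rowsFrom matrix N i := by
      unfold altRowStep
      rw [show ([] : List Bool) = cellsFrom matrix N i N by simp [cellsFrom],
        inner_loop matrix N i (by omega) N le_rfl, rowsFrom_cons matrix N i (by omega)]
    rw [hstep]
    exact ih (by omega)

-- under Pre_, every board entry is -1 or nonnegative
lemma valAt_entry (matrix : List (List Int)) (N : Nat) (Hlen : N ≤ matrix.length)
    (Hrow : ∀ r ∈ matrix, N ≤ r.length)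
    (Hent : ∀ r ∈ matrix, ∀ v ∈ r, v = -1 ∨ 0 ≤ v)
    (i j : Nat) (hi : i < N) (hj : j < N) :
    valAt matrix i j = -1 ∨ 0 ≤ valAt matrix i j := by
  have h1 : i < matrix.length := by omega
  have hrow : matrix.getD i [] = matrix[i] := by
    rw [List.getD_eq_getElem?_getD, List.getElem?_eq_getElem h1]
    rfl
  have hmem : matrix[i] ∈ matrix := List.getElem_mem h1
  have h2 : j < (matrix[i]).length := by have := Hrow _ hmem; omega
  have hval : valAt matrix i j = (matrix[i])[j] := by
    unfold valAt
    rw [hrow, List.getD_eq_getElem?_getD, List.getElem?_eq_getElem h2]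
    rfl
  rw [hval]
  exact Hent _ hmem _ (List.getElem_mem h2)

-- A's fuelled recursion computes the table on nonnegative coordinates, given enough fuel
lemma A_eq_tab (matrix : List (List Int)) (N : Nat)
    (Hlen : N ≤ matrix.length)
    (Hrow : ∀ r ∈ matrix, N ≤ r.length)
    (Hent : ∀ r ∈ matrix, ∀ v ∈ r, v = -1 ∨ 0 ≤ v) :
    ∀ (fuel : Nat) (x y : Int), 0 ≤ x → 0 ≤ y →
      (N - x.toNat) + (N - y.toNat) < fuel →
      isAttachableFuel fuel x y (N : Int) matrix
        = if x.toNat < N ∧ y.toNat < N then tab matrix N x.toNat y.toNat else false := by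
  intro fuel
  induction fuel with
  | zero =>
    intro x y hx hy hm
    omega
  | succ fuel ih =>
    intro x y hx hy hm
    by_cases hxy : x.toNat < N ∧ y.toNat < N
    · rw [if_pos hxy]
      simp only [isAttachableFuel]
      rw [if_neg (by omega), lookup_eq_valAt matrix x y hx hy]
      rw [tab_eq matrix N x.toNat y.toNat hxy.1 hxy.2]
      by_cases h0 : valAt matrix x.toNat y.toNat = 0
      · rw [if_pos h0]
        rw [if_neg (by omega), if_pos (by omega)]
      · rw [if_neg h0]
        by_cases h1 : valAt matrix x.toNat y.toNat = -1
        · rw [if_pos h1, if_pos h1]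
        · rw [if_neg h1, if_neg h1]
          -- the entry is a genuine jump: Pre_ makes it ≥ 1
          have hv1 : 1 ≤ valAt matrix x.toNat y.toNat := by
            rcases valAt_entry matrix N Hlen Hrow Hent x.toNat y.toNat hxy.1 hxy.2 with h | h
            · exact absurd h h1
            · omega
          rw [if_neg (by omega)]
          have hL := ih x (y + valAt matrix x.toNat y.toNat) hx (by omega) (by omega)
          have hR := ih (x + valAt matrix x.toNat y.toNat) y (by omega) hy (by omega)
          rw [hL, hR]
          rw [show (y + valAt matrix x.toNat y.toNat).toNat
                = y.toNat + (valAt matrix x.toNat y.toNat).toNat by omega,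
            show (x + valAt matrix x.toNat y.toNat).toNat
                = x.toNat + (valAt matrix x.toNat y.toNat).toNat by omega]
          simp [hxy.1, hxy.2]
    · rw [if_neg hxy]
      simp only [isAttachableFuel]
      rw [if_pos (by omega)]

-- ===== VERDICT (by name: the statement is the Claim_ definition above) =====
theorem is_attachable_spec : Claim_unchanged_is_attachable := by
  intro x y n matrix _ hpre
  unfold Spec_is_attachable
  intro hnd
  unfold D_is_attachable at hnd
  by_cases hout : n ≤ x ∨ n ≤ y
  · have hA : is_attachable x y n matrix = false := by
      unfold is_attachable
      simp only [isAttachableFuel]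
      rw [if_pos (by omega)]
    have hB : is_attachable_alt x y n matrix = false := by
      unfold is_attachable_alt
      rw [if_neg (by omega)]
    rw [hA, hB]
  · rcases hpre with h | h | hmain
    · omega
    · omega
    obtain ⟨hlen, hrowlen, hent, hxlo, hylo, hsign⟩ := hmain
    by_cases hxy0 : 0 ≤ x ∧ 0 ≤ y
    case neg =>
      -- a negative in-board coordinate admitted by Pre_: the wrap-around cell is -1 or 0,
      -- and ¬D_ rules out -1, so A reads 0 and returns False, as B does
      have hneg : x < 0 ∨ y < 0 := by omega
      have hc0 : wrapCell x y matrix = 0 := by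
        rcases hsign with h | h
        · exact absurd h hxy0
        rcases h with h | h
        · exact absurd ⟨hneg, by omega, by omega, h⟩ hnd
        · exact h
      have hA : is_attachable x y n matrix = false := by
        unfold is_attachable
        rw [isAttachableFuel_start _ _ _ _ _ 0 (by omega)
          ((lookup_eq_wrapCell matrix x y hxlo (by omega) hylo
              (fun r hr => by have := hrowlen r hr; omega)).trans hc0)]
        simp
      rw [hA, alt_false_of_neg x y n matrix hneg]
    case pos =>
    obtain ⟨hx, hy⟩ := hxy0
    set N := n.toNat with hN
    have hn : (N : Int) = n := Int.toNat_of_nonneg (by omega)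
    have hA : is_attachable x y n matrix = tab matrix N x.toNat y.toNat := by
      unfold is_attachable
      rw [← hn]
      rw [A_eq_tab matrix N (by omega) (fun r hr => by have := hrowlen r hr; omega) hent
        (((N : Int) - x).toNat + ((N : Int) - y).toNat + 1) x y hx hy (by omega)]
      rw [if_pos (by constructor <;> omega)]
    have hB : is_attachable_alt x y n matrix = tab matrix N x.toNat y.toNat := by
      unfold is_attachable_alt
      rw [← hn]
      rw [if_pos ⟨hx, by omega, hy, by omega⟩]
      rw [show ([] : List (List Bool)) = rowsFrom matrix N N by simp [rowsFrom],
        outer_loop matrix N N le_rfl]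
      dsimp only
      rw [getD_rowsFrom matrix N 0 x.toNat (by omega), Nat.zero_add,
        getD_cellsFrom matrix N x.toNat 0 y.toNat (by omega), Nat.zero_add]
    rw [hA, hB]

theorem is_attachable_changed : Claim_changed_is_attachable := by
  unfold Claim_changed_is_attachable; decide

theorem is_attachable_tight : Claim_exact_is_attachable := by
  intro x y n matrix _ hpre hd
  obtain ⟨hneg, hxn, hyn, hcell⟩ := hd
  rcases hpre with h | h | hmain
  · omega
  · omega
  obtain ⟨hlen, hrowlen, hent, hxlo, hylo, _⟩ := hmain
  have hA : is_attachable x y n matrix = true := by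
    unfold is_attachable
    rw [isAttachableFuel_start _ _ _ _ _ (-1) (by omega)
      ((lookup_eq_wrapCell matrix x y hxlo (by omega) hylo
          (fun r hr => by have := hrowlen r hr; omega)).trans hcell)]
    norm_num
  rw [hA, alt_false_of_neg x y n matrix hneg]
  simp
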